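-- pv_equiv track=rewrite | github.com/goshtdev/upbge | doc/python_api/sphinx_stub_gen.py | iter_class_roles
-- ===== SOURCE A (Python) =====
-- def iter_class_roles(text: str) -> list[str]:
--     """Return content strings from all ``:class:`X``` patterns in *text*."""
--     marker = ":class:`"
--     result: list[str] = []
--     pos = 0
--     while True:
--         idx = text.find(marker, pos)
--         if idx == -1:
--             break
--         start = idx + len(marker)
--         end = text.find("`", start)
--         if end == -1:
--             break
--         result.append(text[start:end])
--         pos = end + 1
--     return result
-- ===== SOURCE B (Python) =====
-- import re
--
-- _CLASS_ROLE_RE = re.compile(r":class:`([^`]*)`")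
--
-- def iter_class_roles(text: str) -> list[str]:
--     """Return content strings from all ``:class:`X``` patterns in *text*."""
--     return _CLASS_ROLE_RE.findall(text)
-- ===== Notes on version B (the rewrite author's own statement) =====
-- stated objective: idiomatic
-- what changed: Replaces the manual find-based while loop over string indices with a single compiled regex :class:`([^`]*)` and re.findall, whose greedy [^`]* reproduces A's scan-to-next-backtick semantics exactly.
import Mathlib
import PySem

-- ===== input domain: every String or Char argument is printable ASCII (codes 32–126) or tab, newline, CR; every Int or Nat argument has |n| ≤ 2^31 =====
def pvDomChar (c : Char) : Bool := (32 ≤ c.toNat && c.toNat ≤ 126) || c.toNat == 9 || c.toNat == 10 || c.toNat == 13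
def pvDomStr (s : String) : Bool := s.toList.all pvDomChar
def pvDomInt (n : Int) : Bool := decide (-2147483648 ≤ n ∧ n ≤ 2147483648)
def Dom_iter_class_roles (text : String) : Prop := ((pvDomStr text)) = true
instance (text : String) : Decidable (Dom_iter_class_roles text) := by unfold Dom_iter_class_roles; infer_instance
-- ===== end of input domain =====

-- B replaces A's manual find-based while loop with one compiled regex :class:`([^`]*)` and
-- re.findall — a more idiomatic formulation with the same results.

-- ===== PORT A =====
-- A's while loop over an index `pos`, using text.find(marker, pos) and text.find('`', start).
-- `fuel` is only a termination bound on the number of iterations (each iteration moves pos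
-- forward by at least 9); iter_class_roles supplies length+1, which is never exhausted.
def iterClassLoop (s : List Char) : Nat → Int → List String
  | 0, _ => []
  | fuel + 1, pos =>
    let idx := PySem.Chars.findFrom s (":class:`".toList) pos none
    if idx = -1 then []
    else
      let start := idx + 8
      let e := PySem.Chars.findFrom s ['`'] start none
      if e = -1 then []
      else String.ofList (PySem.Chars.slice s (some start) (some e)) :: iterClassLoop s fuel (e + 1)

def iter_class_roles (text : String) : List String :=
  iterClassLoop text.toList (text.toList.length + 1) 0

-- ===== PORT B =====
-- B is re.findall(r":class:`([^`]*)`", text), ported as what the regex engine does on this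
-- pattern: attempt a match at each position; on a match, `[^`]*` captures greedily up to the
-- next backtick and scanning resumes right after the closing backtick; if the marker matches
-- but no backtick remains after it, no later match is possible (every match needs a backtick
-- and none remain), so the scan ends.
def regexScan : List Char → List String
  | [] => []
  | c :: rest =>
    if (":class:`".toList).isPrefixOf (c :: rest) then
      match h : (rest.drop 7).dropWhile (fun ch => ch ≠ '`') with
      | [] => []
      | _ :: rest' => String.ofList ((rest.drop 7).takeWhile (fun ch => ch ≠ '`')) :: regexScan rest'
    else regexScan rest
  termination_by t => t.length
  decreasing_by
  · have h1 := List.length_dropWhile_le (fun ch => ch ≠ '`') (rest.drop 7)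
    rw [h] at h1
    simp at h1 ⊢
    omega
  · simp

def iter_class_roles_alt (text : String) : List String := regexScan text.toList

-- ===== PRECONDITION & SPEC =====
def Spec_iter_class_roles (text : String) (out : List String) : Prop := out = iter_class_roles_alt text
instance (text : String) (out : List String) : Decidable (Spec_iter_class_roles text out) := by unfold Spec_iter_class_roles; infer_instance

-- ===== CLAIM (what is proved, stated in full; the proofs are below) =====
def Claim_equal_iter_class_roles : Prop := ∀ (text : String), Dom_iter_class_roles text → Spec_iter_class_roles text (iter_class_roles text)

-- ===== LEMMAS AND PROOFS =====

-- the scan finds nothing when the marker occurs nowhere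
theorem regexScan_nil_of_not_infix (t : List Char) (h : ¬ (":class:`".toList <:+: t)) :
    regexScan t = [] := by
  induction t with
  | nil => simp [regexScan]
  | cons c rest ih =>
    rw [regexScan]
    have hnp : (":class:`".toList).isPrefixOf (c :: rest) = false := by
      by_contra hc
      simp only [Bool.not_eq_false] at hc
      exact h (List.isPrefixOf_iff_prefix.mp hc).isInfix
    simp only [hnp, Bool.false_eq_true, if_false]
    exact ih (fun hi => h (List.infix_cons hi))

-- the scan skips positions where the marker is not a prefix
theorem regexScan_skip (jn : Nat) : ∀ (t : List Char), jn ≤ t.length →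
    (∀ i, i < jn → ¬ (":class:`".toList <+: t.drop i)) →
    regexScan t = regexScan (t.drop jn) := by
  induction jn with
  | zero => intro t _ _; simp
  | succ n ih =>
    intro t hle h
    match t with
    | [] => simp at hle
    | c :: rest =>
      have h0 := h 0 (Nat.succ_pos n)
      simp only [List.drop_zero] at h0
      have hnp : (":class:`".toList).isPrefixOf (c :: rest) = false := by
        by_contra hc
        simp only [Bool.not_eq_false] at hc
        exact h0 (List.isPrefixOf_iff_prefix.mp hc)
      rw [regexScan]
      simp only [hnp, Bool.false_eq_true, if_false]
      have := ih rest (by simpa using hle) (fun i hi => by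
        have := h (i+1) (by omega)
        simpa using this)
      simpa using this

-- takeWhile/dropWhile split at the first failing element
theorem takeWhile_eq_take_of {α : Type} (u : List α) (k : Nat) (p : α → Bool)
    (h1 : ∀ x ∈ u.take k, p x = true) (a : α) (r : List α)
    (h2 : u.drop k = a :: r) (h3 : p a = false) :
    u.takeWhile p = u.take k ∧ u.dropWhile p = u.drop k := by
  have hu : u = u.take k ++ u.drop k := (List.take_append_drop k u).symm
  have htk : (u.take k).takeWhile p = u.take k := List.takeWhile_eq_self_iff.mpr h1
  have htw : u.takeWhile p = u.take k := by
    conv_lhs => rw [hu]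
    rw [List.takeWhile_append]
    rw [htk, h2]
    simp [h3]
  refine ⟨htw, ?_⟩
  have hh := List.takeWhile_append_dropWhile (p := p) (l := u)
  rw [htw] at hh
  conv_rhs at hh => rw [hu]
  exact (List.append_cancel_left hh)

-- main invariant: A's loop from position p computes B's scan of the suffix from p
theorem loop_eq_scan (fuel : Nat) : ∀ (s : List Char) (p : Nat), p ≤ s.length →
    s.length ≤ fuel + p → iterClassLoop s fuel (p : Int) = regexScan (s.drop p) := by
  induction fuel with
  | zero =>
    intro s p h1 h2
    have : s.drop p = [] := List.drop_eq_nil_of_le (by omega)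
    rw [this]
    simp [iterClassLoop, regexScan]
  | succ fuel ih =>
    intro s p hp hfuel
    rw [iterClassLoop]
    simp only []
    rw [PySem.Chars.findFrom_natCast s _ p hp]
    by_cases hf : PySem.Chars.find (s.drop p) (":class:`".toList) = -1
    · rw [if_pos hf]
      exact (if_pos rfl).trans (regexScan_nil_of_not_infix _ ((PySem.Chars.find_eq_neg_one_iff _ _).mp hf)).symm
    · rw [if_neg hf]
      have hj0 : 0 ≤ PySem.Chars.find (s.drop p) (":class:`".toList) := by
        have := PySem.Chars.neg_one_le_find (s.drop p) (":class:`".toList)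
        omega
      obtain ⟨jn, hjn⟩ : ∃ jn : Nat, PySem.Chars.find (s.drop p) (":class:`".toList) = (jn : Int) :=
        ⟨_, (Int.toNat_of_nonneg hj0).symm⟩
      have hspec := PySem.Chars.find_spec (s := s.drop p) (sub := ":class:`".toList) hj0
      rw [hjn] at hspec
      simp only [Int.toNat_natCast] at hspec
      obtain ⟨hpre, hmin⟩ := hspec
      rw [hjn]
      -- t.drop jn = marker ++ tail
      obtain ⟨tail, htail⟩ := hpre
      have hdd : (s.drop p).drop jn = s.drop (p + jn) := by rw [List.drop_drop]
      have hlen8 : (":class:`".toList).length = 8 := by decide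
      have hplen : p + jn + 8 ≤ s.length := by
        have h1 : ((s.drop p).drop jn).length = s.length - (p + jn) := by
          simp
        have h2 : (":class:`".toList ++ tail).length = 8 + tail.length := by
          simp; omega
        rw [htail, h1] at h2
        omega
      have hne : ¬ ((p : Int) + (jn : Int) = -1) := by omega
      rw [if_neg hne]
      -- skip to jn on the B side
      have hjle : jn ≤ (s.drop p).length := by
        simp only [List.length_drop]; omega
      have hskip := regexScan_skip jn (s.drop p) hjle hmin
      rw [hskip, ← htail]
      -- unfold B at the marker
      have hmk : ":class:`".toList = ':' :: "class:`".toList := rfl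
      rw [hmk, List.cons_append, regexScan]
      have hpre2 : (":class:`".toList).isPrefixOf (':' :: ("class:`".toList ++ tail)) = true := by
        refine List.isPrefixOf_iff_prefix.mpr ⟨tail, ?_⟩
        rw [hmk, List.cons_append]
      rw [hpre2]
      simp only [if_true]
      have hdrop7 : ("class:`".toList ++ tail).drop 7 = tail := by simp
      rw [hdrop7]
      -- second find: s.drop (p+jn+8) = tail
      have hstart : ((p : Int) + (jn : Int) + 8) = ((p + jn + 8 : Nat) : Int) := by push_cast; ring
      rw [hstart, PySem.Chars.findFrom_natCast s _ (p + jn + 8) hplen]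
      have hu : s.drop (p + jn + 8) = tail := by
        have : (s.drop (p + jn)).drop 8 = s.drop (p + jn + 8) := by rw [List.drop_drop]
        rw [← this, ← hdd, ← htail, hmk]
        simp
      rw [hu]
      by_cases hg : PySem.Chars.find tail ['`'] = -1
      · rw [if_pos hg, if_pos rfl]
        have hnume : '`' ∉ tail := by
          rw [PySem.Chars.find_eq_neg_one_iff] at hg
          exact fun hm => hg ((List.singleton_infix_iff _ _).mpr hm)
        have : tail.dropWhile (fun ch => ch ≠ '`') = [] :=
          List.dropWhile_eq_nil_iff.mpr (fun x hx => by simp; rintro rfl; exact hnume hx)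
        rw [this]
      · rw [if_neg hg]
        have hk0 : 0 ≤ PySem.Chars.find tail ['`'] := by
          have := PySem.Chars.neg_one_le_find tail ['`']
          omega
        obtain ⟨k, hk⟩ : ∃ k : Nat, PySem.Chars.find tail ['`'] = (k : Int) :=
          ⟨_, (Int.toNat_of_nonneg hk0).symm⟩
        have hkspec := PySem.Chars.find_spec (s := tail) (sub := ['`']) hk0
        rw [hk] at hkspec
        simp only [Int.toNat_natCast] at hkspec
        obtain ⟨hkpre, hkmin⟩ := hkspec
        obtain ⟨r, hr⟩ := hkpre
        rw [List.singleton_append] at hr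
        have hr' : tail.drop k = '`' :: r := hr.symm
        have hkl : k < tail.length := by
          by_contra hc
          rw [List.drop_eq_nil_of_le (by omega)] at hr'
          simp at hr'
        have h1 : ∀ x ∈ tail.take k, (fun ch => decide (ch ≠ '`')) x = true := by
          intro x hx
          obtain ⟨i, hi, hieq⟩ := List.getElem_of_mem hx
          have hik : i < k := by have := List.length_take_le k tail; omega
          have hil : i < tail.length := by omega
          rw [List.getElem_take] at hieq
          simp only [decide_eq_true_eq]
          rintro rfl
          exact hkmin i hik ⟨tail.drop (i+1), by rw [List.singleton_append, ← hieq, ← List.drop_eq_getElem_cons hil]⟩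
        obtain ⟨htw, hdw⟩ := takeWhile_eq_take_of tail k _ h1 '`' r hr' (by simp)
        rw [hdw, hr']
        -- A side: e and slice
        have he : ((p + jn + 8 : Nat) : Int) + (k : Int) = ((p + jn + 8 + k : Nat) : Int) := by push_cast; ring
        rw [hk, he]
        have hene : ¬ (((p + jn + 8 + k : Nat) : Int) = -1) := by omega
        rw [if_neg hene]
        have hslice : PySem.Chars.slice s (some ((p + jn + 8 : Nat) : Int)) (some ((p + jn + 8 + k : Nat) : Int)) = tail.take k := by
          rw [PySem.Chars.slice_eq_listSlice, PySem.List.slice_natCast, hu]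
          congr 1
          omega
        rw [hslice, htw]
        -- recursive call
        have htl : tail.length = s.length - (p + jn + 8) := by rw [← hu]; simp
        have hrec : ((p + jn + 8 + k : Nat) : Int) + 1 = ((p + jn + 8 + k + 1 : Nat) : Int) := by push_cast; ring
        rw [hrec, ih s (p + jn + 8 + k + 1) (by omega) (by omega)]
        have : s.drop (p + jn + 8 + k + 1) = r := by
          have h4 : (s.drop (p + jn + 8)).drop (k + 1) = s.drop (p + jn + 8 + k + 1) := by
            rw [List.drop_drop]; congr 1
          rw [← h4, hu, ← List.drop_drop, hr']
          simp
        rw [this]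

-- ===== VERDICT (by name: the statement is the Claim_ definition above) =====
theorem iter_class_roles_spec : Claim_equal_iter_class_roles := by
  intro text _
  unfold Spec_iter_class_roles iter_class_roles iter_class_roles_alt
  have := loop_eq_scan (text.toList.length + 1) text.toList 0 (Nat.zero_le _) (by omega)
  simpa using this
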